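-- pv_equiv track=rewrite | github.com/dnjsxo0616/algorithm | 프로그래머스/lv0/120835. 진료 순서 정하기/진료 순서 정하기.py | solution
-- ===== SOURCE A (Python) =====
-- def solution(emergency):
--     answer = []
--     arr= {}
--     res = sorted(emergency, reverse=True)
--     ind = 1
--     for i in res:
--         arr[i] = ind
--         ind += 1
--     for j in emergency:
--         answer.append(arr[j])
--     return answer
-- ===== SOURCE B (Python) =====
-- def solution(emergency):
--     return [sum(1 for x in emergency if x >= e) for e in emergency]
-- ===== Notes on version B (the rewrite author's own statement) =====
-- stated objective: simpler
-- what changed: Replaces the sort + index-dict construction with a one-line counting comprehension: the rank of e is the number of elements >= e (which reproduces A's last-index rank for duplicates).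
import Mathlib
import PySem

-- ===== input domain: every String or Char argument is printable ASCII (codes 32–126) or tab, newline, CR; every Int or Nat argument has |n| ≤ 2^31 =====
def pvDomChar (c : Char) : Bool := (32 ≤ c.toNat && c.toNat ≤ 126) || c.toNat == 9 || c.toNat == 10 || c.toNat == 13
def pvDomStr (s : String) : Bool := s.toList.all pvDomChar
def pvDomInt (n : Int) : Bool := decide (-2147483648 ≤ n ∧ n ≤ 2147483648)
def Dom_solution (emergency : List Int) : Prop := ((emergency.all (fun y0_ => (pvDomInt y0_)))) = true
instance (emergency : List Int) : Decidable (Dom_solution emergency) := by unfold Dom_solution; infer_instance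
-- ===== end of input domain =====

-- B replaces the sort + index-dict construction with a one-line counting
-- comprehension (rank of e = number of elements >= e); objective: simpler.

-- ===== PORT A =====
def solution (emergency : List Int) : List Int :=
  let res := PySem.List.sorted emergency (fun x => x) true
  let arr := (res.foldl
      (fun (st : PySem.Dict Int Int × Int) i => (st.1.insert i st.2, st.2 + 1))
      (PySem.Dict.empty, 1)).1
  emergency.foldl (fun answer j => answer ++ [arr.getD j 0]) []

-- ===== PORT B =====
def solution_alt (emergency : List Int) : List Int :=
  emergency.map (fun e => (emergency.countP (fun x => decide (e ≤ x)) : Int))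

-- ===== PRECONDITION & SPEC =====
def Spec_solution (emergency : List Int) (out : List Int) : Prop := out = solution_alt emergency
instance (emergency : List Int) (out : List Int) : Decidable (Spec_solution emergency out) := by unfold Spec_solution; infer_instance

-- ===== CLAIM (what is proved, stated in full; the proofs are below) =====
def Claim_equal_solution : Prop := ∀ (emergency : List Int), Dom_solution emergency → Spec_solution emergency (solution emergency)

-- ===== LEMMAS AND PROOFS =====

-- frame: keys not in the remaining list are untouched by the loop
lemma rank_fold_getD_of_not_mem (l : List Int) (e : Int) (he : e ∉ l) :
    ∀ (d : PySem.Dict Int Int) (ind : Int),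
      ((l.foldl (fun (st : PySem.Dict Int Int × Int) i => (st.1.insert i st.2, st.2 + 1)) (d, ind)).1).getD e 0 = d.getD e 0 := by
  induction l with
  | nil => intro d ind; rfl
  | cons a t ih =>
    intro d ind
    simp only [List.mem_cons, not_or] at he
    simp only [List.foldl_cons]
    rw [ih he.2, PySem.Dict.getD_insert_of_ne _ _ _ he.1]

-- invariant: on a descending list, the final index stored for e is
-- ind + (#elements ≥ e) - 1
lemma rank_fold_getD (l : List Int) (hs : l.Pairwise (fun a b => b ≤ a))
    (e : Int) (he : e ∈ l) :
    ∀ (d : PySem.Dict Int Int) (ind : Int),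
      ((l.foldl (fun (st : PySem.Dict Int Int × Int) i => (st.1.insert i st.2, st.2 + 1)) (d, ind)).1).getD e 0
        = ind + (l.countP (fun x => decide (e ≤ x)) : Int) - 1 := by
  induction l with
  | nil => cases he
  | cons a t ih =>
    intro d ind
    rcases List.pairwise_cons.mp hs with ⟨hall, ht⟩
    simp only [List.foldl_cons]
    by_cases hmem : e ∈ t
    · have hea : e ≤ a := hall e hmem
      rw [ih ht hmem]
      have : (a :: t).countP (fun x => decide (e ≤ x))
          = t.countP (fun x => decide (e ≤ x)) + 1 := by
        simp [hea]
      rw [this]; push_cast; ring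
    · have hea : e = a := by
        rcases List.mem_cons.mp he with h | h
        · exact h
        · exact absurd h hmem
      subst hea
      rw [rank_fold_getD_of_not_mem t e hmem, PySem.Dict.getD_insert_self]
      have h0 : t.countP (fun x => decide (e ≤ x)) = 0 := by
        rw [List.countP_eq_zero]
        intro x hx hpx
        have hxe : x ≤ e := hall x hx
        have hex : e ≤ x := of_decide_eq_true hpx
        exact hmem (le_antisymm hxe hex ▸ hx)
      simp [h0]

-- ===== VERDICT (by name: the statement is the Claim_ definition above) =====
theorem solution_spec : Claim_equal_solution := by
  intro emergency _
  unfold Spec_solution solution solution_alt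
  simp only []
  rw [PySem.List.foldl_append_singleton_eq_map]
  apply List.map_congr_left
  intro j hj
  set res := PySem.List.sorted emergency (fun x => x) true with hres
  have hperm : res.Perm emergency := PySem.List.sorted_perm emergency (fun x => x) true
  have hjres : j ∈ res := (PySem.List.mem_sorted emergency (fun x => x) true j).mpr hj
  have hpair : res.Pairwise (fun a b => b ≤ a) := by
    have := PySem.List.sorted_pairwise_rev emergency (fun x => x)
    simpa using this
  rw [rank_fold_getD res hpair j hjres PySem.Dict.empty 1, hperm.countP_eq]
  ring
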